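-- pv_equiv track=rewrite | github.com/sunieee/DigitalImage | LineExtraction/tailor.py | get_dark_frag
-- ===== SOURCE A (Python) =====
-- def get_dark_frag(dark_index):
--     line = []
--
--     def add_line(i):
--         j = i + 1
--         while j in dark_index or j + 1 in dark_index or j + 2 in dark_index or j + 3 in dark_index \
--             or j + 4 in dark_index or j + 5 in dark_index:
--             j += 1
--         line.append((i, j-1))
--
--     for i in dark_index:
--         if  i-1 not in dark_index:
--             add_line(i)
--     return line
-- ===== SOURCE B (Python) =====
-- def get_dark_frag(dark_index):
--     s = set(dark_index)
--     xs = sorted(s)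
--     # one backward pass: end of the gap-<=6 chain containing each element
--     end = {}
--     nxt = None
--     for x in reversed(xs):
--         if nxt is not None and nxt - x <= 6:
--             end[x] = end[nxt]
--         else:
--             end[x] = x
--         nxt = x
--     return [(i, end[i]) for i in dark_index if i - 1 not in s]
-- ===== Notes on version B (the rewrite author's own statement) =====
-- stated objective: faster
-- what changed: A rescans the list for membership at every unit step of a per-start while loop; B builds the set once, sorts the distinct indices, precomputes each gap-bridged chain's end in a single backward pass, and answers each start by one dictionary lookup.
import Mathlib
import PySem

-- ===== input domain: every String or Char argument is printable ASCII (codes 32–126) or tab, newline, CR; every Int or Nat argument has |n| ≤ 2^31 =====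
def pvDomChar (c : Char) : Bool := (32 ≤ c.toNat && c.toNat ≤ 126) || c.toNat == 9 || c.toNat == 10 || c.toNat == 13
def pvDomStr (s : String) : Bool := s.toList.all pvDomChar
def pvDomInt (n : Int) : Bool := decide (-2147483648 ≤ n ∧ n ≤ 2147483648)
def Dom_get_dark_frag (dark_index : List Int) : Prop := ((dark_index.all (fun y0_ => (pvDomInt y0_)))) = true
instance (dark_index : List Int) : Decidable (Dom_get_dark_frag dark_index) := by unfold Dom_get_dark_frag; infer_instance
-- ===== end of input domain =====

-- B replaces A's per-start unit-step scan (with O(n) list membership per step) by one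
-- sorted pass that precomputes each gap-bridged chain's end, then a lookup per start.

-- ===== PORT A =====
-- A's inner while loop of add_line: advance j while any of j..j+5 is in the list.
def addLineJ (dk : List Int) (j : Int) : Int :=
  if h : j ∈ dk ∨ j + 1 ∈ dk ∨ j + 2 ∈ dk ∨ j + 3 ∈ dk ∨ j + 4 ∈ dk ∨ j + 5 ∈ dk then
    addLineJ dk (j + 1)
  else j - 1
termination_by (dk.foldl max 0 + 1 - j).toNat
decreasing_by
  have hub := (PySem.List.le_foldl_max dk 0).2
  rcases h with h|h|h|h|h|h <;> (have := hub _ h; omega)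

def get_dark_frag (dark_index : List Int) : List (Int × Int) :=
  dark_index.foldl (fun line i =>
    if ¬ (i - 1 ∈ dark_index) then line ++ [(i, addLineJ dark_index (i + 1))] else line) []

-- ===== PORT B =====
-- one step of B's backward pass over the sorted distinct indices
-- (the getD lookup is exact: Python reads end[nxt], which was inserted on the previous step)
def chainStep (st : PySem.Dict Int Int × Option Int) (x : Int) : PySem.Dict Int Int × Option Int :=
  match st.2 with
  | some n => if n - x ≤ 6 then (st.1.insert x (st.1.getD n 0), some x)
              else (st.1.insert x x, some x)
  | none => (st.1.insert x x, some x)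

def get_dark_frag_alt (dark_index : List Int) : List (Int × Int) :=
  let s := PySem.Set.ofList dark_index
  let xs := PySem.List.sorted s (fun x => x) false
  let st := xs.reverse.foldl chainStep (PySem.Dict.empty, none)
  (dark_index.filter (fun i => decide (¬ (i - 1 ∈ s)))).map (fun i => (i, st.1.getD i 0))

-- ===== PRECONDITION & SPEC =====
def Spec_get_dark_frag (dark_index : List Int) (out : List (Int × Int)) : Prop := out = get_dark_frag_alt dark_index
instance (dark_index : List Int) (out : List (Int × Int)) : Decidable (Spec_get_dark_frag dark_index out) := by unfold Spec_get_dark_frag; infer_instance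

-- ===== CLAIM (what is proved, stated in full; the proofs are below) =====
def Claim_equal_get_dark_frag : Prop := ∀ (dark_index : List Int), Dom_get_dark_frag dark_index → Spec_get_dark_frag dark_index (get_dark_frag dark_index)

-- ===== LEMMAS AND PROOFS =====

-- A's while loop stops immediately when no list element lies in [j, j+5]
theorem addLineJ_stop (dk : List Int) (j : Int) (h : ∀ y ∈ dk, y < j ∨ j + 5 < y) :
    addLineJ dk j = j - 1 := by
  rw [addLineJ, dif_neg]
  rintro (hc|hc|hc|hc|hc|hc) <;> (rcases h _ hc with h'|h' <;> omega)

theorem addLineJ_step (dk : List Int) (n j : Int) (hn : n ∈ dk) (h1 : j ≤ n) (h2 : n ≤ j + 5) :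
    addLineJ dk j = addLineJ dk (j + 1) := by
  rw [addLineJ, dif_pos]
  have hd : j = n ∨ j + 1 = n ∨ j + 2 = n ∨ j + 3 = n ∨ j + 4 = n ∨ j + 5 = n := by omega
  rcases hd with h|h|h|h|h|h <;> rw [h] <;> tauto

theorem addLineJ_bridge (dk : List Int) (n : Int) (hn : n ∈ dk) :
    ∀ k : Nat, ∀ j : Int, n - j = k → n - 5 ≤ j → addLineJ dk j = addLineJ dk (n + 1) := by
  intro k
  induction k with
  | zero =>
    intro j hk _
    have hj : j = n := by omega
    rw [hj]
    exact addLineJ_step dk n n hn le_rfl (by omega)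
  | succ m ih =>
    intro j hk hlo
    have h1 : addLineJ dk j = addLineJ dk (j + 1) :=
      addLineJ_step dk n j hn (by omega) (by omega)
    rw [h1]
    exact ih (j + 1) (by omega) (by omega)

-- chainStep when the previous element is known
theorem chainStep_some (st : PySem.Dict Int Int × Option Int) (x n : Int) (h : st.2 = some n) :
    chainStep st x = if n - x ≤ 6 then (st.1.insert x (st.1.getD n 0), some x)
                     else (st.1.insert x x, some x) := by
  obtain ⟨d, o⟩ := st
  simp only at h
  subst h
  rfl

-- invariant of B's backward pass, for any suffix l of the sorted distinct list xs
theorem chain_invariant (dk xs : List Int) (hs : xs.Pairwise (· < ·))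
    (hm : ∀ y, y ∈ xs ↔ y ∈ dk) :
    ∀ (l p : List Int), xs = p ++ l →
      (l.foldr (fun x st => chainStep st x) (PySem.Dict.empty, none)).2 = l.head? ∧
      ∀ y ∈ l, (l.foldr (fun x st => chainStep st x) (PySem.Dict.empty, none)).1.get? y
          = some (addLineJ dk (y + 1)) := by
  intro l
  induction l with
  | nil => intro p _; exact ⟨rfl, by simp⟩
  | cons x rest ih =>
    intro p hxs
    obtain ⟨ih1, ih2⟩ := ih (p ++ [x]) (by simp [hxs])
    -- pairwise on the suffix x :: rest
    have hsuf : (x :: rest).Pairwise (· < ·) :=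
      hs.sublist (hxs ▸ List.sublist_append_right p (x :: rest))
    have hx_lt : ∀ y ∈ rest, x < y := fun y hy => (List.pairwise_cons.mp hsuf).1 y hy
    -- every dark element above x already lies in rest
    have hbelow : ∀ y ∈ dk, x < y → y ∈ rest := by
      intro y hy hxy
      have hyx : y ∈ xs := (hm y).mpr hy
      rw [hxs, List.mem_append] at hyx
      rcases hyx with hyp | hyc
      · exfalso
        have := (List.pairwise_append.mp (hxs ▸ hs)).2.2 y hyp x (by simp)
        omega
      · rcases List.mem_cons.mp hyc with h | h
        · omega
        · exact h
    simp only [List.foldr_cons]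
    cases rest with
    | nil =>
      simp only [List.foldr_nil]
      refine ⟨rfl, ?_⟩
      intro y hy
      rcases List.mem_cons.mp hy with h | h
      · subst h
        simp only [chainStep, PySem.Dict.get?_insert_self]
        have : addLineJ dk (y + 1) = y := by
          rw [addLineJ_stop dk (y + 1) ?_]
          · omega
          · intro z hz
            by_cases hzy : z ≤ y
            · omega
            · exact absurd (hbelow z hz (by omega)) (by simp)
        rw [this]
      · simp at h
    | cons n t =>
      have hst2 : ((n :: t).foldr (fun x st => chainStep st x) (PySem.Dict.empty, none)).2
          = some n := by simpa using ih1
      have hn_dk : n ∈ dk := (hm n).mp (by rw [hxs]; simp)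
      have hxn : x < n := hx_lt n (by simp)
      have hgap : ∀ y ∈ dk, x < y → n ≤ y := by
        intro y hy hxy
        rcases List.mem_cons.mp (hbelow y hy hxy) with h | h
        · omega
        · have hsuf2 : (n :: t).Pairwise (· < ·) := (List.pairwise_cons.mp hsuf).2
          have := (List.pairwise_cons.mp hsuf2).1 y h
          omega
      have hget_n := ih2 n (by simp)
      rw [chainStep_some _ x n hst2]
      by_cases hle : n - x ≤ 6
      · rw [if_pos hle]
        dsimp only
        refine ⟨rfl, ?_⟩
        intro y hy
        rcases List.mem_cons.mp hy with h | h
        · subst h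
          simp only [PySem.Dict.get?_insert_self]
          simp only [PySem.Dict.getD_eq_get?_getD, hget_n, Option.getD_some]
          have : addLineJ dk (y + 1) = addLineJ dk (n + 1) :=
            addLineJ_bridge dk n hn_dk (n - (y + 1)).toNat (y + 1) (by omega) (by omega)
          rw [this]
        · rw [PySem.Dict.get?_insert_of_ne (hne := by have := hx_lt y h; omega)]
          exact ih2 y h
      · rw [if_neg hle]
        dsimp only
        refine ⟨rfl, ?_⟩
        intro y hy
        rcases List.mem_cons.mp hy with h | h
        · subst h
          simp only [PySem.Dict.get?_insert_self]
          have : addLineJ dk (y + 1) = y := by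
            rw [addLineJ_stop dk (y + 1) ?_]
            · omega
            · intro z hz
              by_cases hzy : z ≤ y
              · omega
              · have := hgap z hz (by omega); omega
          rw [this]
        · rw [PySem.Dict.get?_insert_of_ne (hne := by have := hx_lt y h; omega)]
          exact ih2 y h

-- ===== VERDICT (by name: the statement is the Claim_ definition above) =====
theorem get_dark_frag_spec : Claim_equal_get_dark_frag := by
  intro dk _
  unfold Spec_get_dark_frag get_dark_frag get_dark_frag_alt
  rw [PySem.List.foldl_append_ite (p := fun i => ¬ (i - 1 ∈ dk))
      (f := fun i => (i, addLineJ dk (i + 1)))]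
  simp only [List.nil_append]
  have hfil : dk.filter (fun i => decide (¬ (i - 1 ∈ PySem.Set.ofList dk)))
      = dk.filter (fun i => decide (¬ (i - 1 ∈ dk))) := by
    apply List.filter_congr
    intro i _
    simp [PySem.Set.mem_ofList]
  rw [List.foldl_reverse, hfil]
  apply List.map_congr_left
  intro i hi
  have hidk : i ∈ dk := (List.mem_filter.mp hi).1
  have hsort := PySem.List.sorted_ofList_pairwise_lt (xs := dk)
  have hmem : ∀ y, y ∈ PySem.List.sorted (PySem.Set.ofList dk) (fun x => x) false ↔ y ∈ dk := by
    intro y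
    rw [PySem.List.mem_sorted, PySem.Set.mem_ofList]
  obtain ⟨_, h2⟩ := chain_invariant dk _ hsort hmem
    (PySem.List.sorted (PySem.Set.ofList dk) (fun x => x) false) [] rfl
  have h3 := h2 i ((hmem i).mpr hidk)
  simp only [PySem.Dict.getD_eq_get?_getD, h3, Option.getD_some]
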